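-- pv_equiv track=rewrite | github.com/chenyh200807/luban-deep | deeptutor/services/question_followup.py | _available_option_keys
-- ===== SOURCE A (Python) =====
-- from typing import Any
--
-- def _available_option_keys(question_context: dict[str, Any]) -> str:
--     options = question_context.get("options") or {}
--     keys = [
--         str(key).strip().upper()[:1]
--         for key in options.keys()
--         if str(key).strip().upper()[:1] in {"A", "B", "C", "D", "E"}
--     ]
--     return "".join(sorted(set(keys))) or "ABCDE"
-- ===== SOURCE B (Python) =====
-- from typing import Any
--
--
-- def _available_option_keys(question_context: dict[str, Any]) -> str:
--     options = question_context.get("options") or {}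
--     present = {str(key).strip().upper()[:1] for key in options.keys()}
--     return "".join(c for c in "ABCDE" if c in present) or "ABCDE"
-- ===== Notes on version B (the rewrite author's own statement) =====
-- stated objective: idiomatic
-- what changed: B builds the set of normalized first letters once and scans the fixed canonical alphabet 'ABCDE' keeping the letters present, eliminating A's filter-then-dedup-then-sort pipeline over the keys.
import Mathlib
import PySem

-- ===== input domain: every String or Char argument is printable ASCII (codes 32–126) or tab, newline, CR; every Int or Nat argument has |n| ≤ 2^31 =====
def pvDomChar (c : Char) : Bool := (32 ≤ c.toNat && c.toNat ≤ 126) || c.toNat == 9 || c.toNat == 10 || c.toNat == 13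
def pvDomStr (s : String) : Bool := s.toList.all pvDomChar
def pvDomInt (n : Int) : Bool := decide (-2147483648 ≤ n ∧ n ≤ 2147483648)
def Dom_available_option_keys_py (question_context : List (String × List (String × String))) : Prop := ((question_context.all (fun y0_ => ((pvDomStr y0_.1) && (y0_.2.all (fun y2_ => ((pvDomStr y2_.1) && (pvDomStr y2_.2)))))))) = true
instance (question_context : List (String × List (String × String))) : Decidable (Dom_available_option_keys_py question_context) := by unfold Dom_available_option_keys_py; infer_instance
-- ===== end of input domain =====

-- B replaces A's filter→dedup→sort of the keys by one membership set plus a scan of the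
-- canonical alphabet "ABCDE" (objective: idiomatic; no measured speed claim).

-- shared helpers (the identical first line of both Pythons, and the normalization
-- 'str(key).strip().upper()[:1]' both apply to each key)
def pvOptions (question_context : List (String × List (String × String))) : List (String × String) :=
  -- question_context.get("options") or {}
  match PySem.Dict.get? (PySem.Dict.mk question_context) "options" with
  | some v => if v.isEmpty then [] else v
  | none => []

def pvNorm (s : String) : String :=
  PySem.Str.slice (PySem.Str.upper (PySem.Str.strip s)) none (some 1)

-- ===== PORT A =====
def available_option_keys_py (question_context : List (String × List (String × String))) : String :=
  let options := pvOptions question_context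
  let keys : List String :=
    ((options.map Prod.fst).filter
      (fun key => decide (pvNorm key ∈ (["A", "B", "C", "D", "E"] : List String)))).map pvNorm
  let res := PySem.Str.join "" (PySem.List.sorted (PySem.Set.ofList keys) (fun x => x) false)
  if res = "" then "ABCDE" else res

-- ===== PORT B =====
def pvLetters : List String := ["A", "B", "C", "D", "E"]  -- the characters of "ABCDE", as Python yields them

def available_option_keys_py_alt (question_context : List (String × List (String × String))) : String :=
  let options := pvOptions question_context
  let present : PySem.Set String := PySem.Set.ofList ((options.map Prod.fst).map pvNorm)
  let res := PySem.Str.join "" (pvLetters.filter (fun c => PySem.Set.contains present c))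
  if res = "" then "ABCDE" else res

-- ===== PRECONDITION & SPEC =====
def Spec_available_option_keys_py (question_context : List (String × List (String × String))) (out : String) : Prop := out = available_option_keys_py_alt question_context
instance (question_context : List (String × List (String × String))) (out : String) : Decidable (Spec_available_option_keys_py question_context out) := by unfold Spec_available_option_keys_py; infer_instance

-- ===== CLAIM (what is proved, stated in full; the proofs are below) =====
def Claim_equal_available_option_keys_py : Prop := ∀ (question_context : List (String × List (String × String))), Dom_available_option_keys_py question_context → Spec_available_option_keys_py question_context (available_option_keys_py question_context)

-- ===== LEMMAS AND PROOFS =====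

-- keys kept by A's comprehension = the normalized keys that land in the alphabet
theorem pv_filter_map_comm (ks : List String) :
    ((ks.filter (fun key => decide (pvNorm key ∈ (["A", "B", "C", "D", "E"] : List String)))).map pvNorm)
    = (ks.map pvNorm).filter (fun m => decide (m ∈ (["A", "B", "C", "D", "E"] : List String))) := by
  induction ks with
  | nil => rfl
  | cons k t ih =>
    simp only [List.map_cons, List.filter_cons]
    by_cases h : decide (pvNorm k ∈ (["A", "B", "C", "D", "E"] : List String)) = true
    · rw [if_pos h, if_pos h, List.map_cons, ih]
    · rw [if_neg h, if_neg h, ih]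

theorem pv_letters_pairwise : (["A", "B", "C", "D", "E"] : List String).Pairwise (· < ·) := by
  norm_num [List.pairwise_cons]; decide

theorem pv_letters_nodup : (["A", "B", "C", "D", "E"] : List String).Nodup := by
  norm_num [List.nodup_cons]; decide

-- sorted(set(·)) of a list of alphabet letters = the canonical alphabet filtered by membership
theorem pv_sorted_eq_filter (ms : List String) :
    PySem.List.sorted (PySem.Set.ofList (ms.filter (fun m => decide (m ∈ (["A", "B", "C", "D", "E"] : List String))))) (fun x => x) false
    = (["A", "B", "C", "D", "E"] : List String).filter (fun c => PySem.Set.contains (PySem.Set.ofList ms) c) := by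
  apply PySem.List.sorted_eq_of_perm_of_pairwise_lt
  · rw [List.perm_ext_iff_of_nodup (List.Nodup.filter _ pv_letters_nodup) (PySem.Set.nodup_ofList _)]
    intro a
    simp only [List.mem_filter, PySem.Set.mem_ofList, PySem.Set.contains_iff, decide_eq_true_eq]
    tauto
  · exact List.Pairwise.filter _ pv_letters_pairwise

theorem available_option_keys_py_core (opts : List (String × String)) :
    (let keys := ((opts.map Prod.fst).filter
        (fun key => decide (pvNorm key ∈ (["A", "B", "C", "D", "E"] : List String)))).map pvNorm
     let res := PySem.Str.join "" (PySem.List.sorted (PySem.Set.ofList keys) (fun x => x) false)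
     if res = "" then "ABCDE" else res)
    = (let present : PySem.Set String := PySem.Set.ofList ((opts.map Prod.fst).map pvNorm)
       let res := PySem.Str.join "" (pvLetters.filter (fun c => PySem.Set.contains present c))
       if res = "" then "ABCDE" else res) := by
  simp only [pvLetters, pv_filter_map_comm, pv_sorted_eq_filter]

-- ===== VERDICT (by name: the statement is the Claim_ definition above) =====
theorem available_option_keys_py_spec : Claim_equal_available_option_keys_py := by
  intro qc _
  unfold Spec_available_option_keys_py available_option_keys_py available_option_keys_py_alt
  exact available_option_keys_py_core (pvOptions qc)
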